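-- pv_equiv track=rewrite | github.com/Darkuss-ai/Diplom | 1kr/basises.py | Sheffer
-- ===== SOURCE A (Python) =====
-- def Sheffer(Tdnf):
--     Tdnf = list(Tdnf)  # переводим в список
--     Tdnf = ["/" if x == "^" or x == "v" else x for x in Tdnf]  # меняем на чёрточку все знаки
--     for i, val in enumerate(Tdnf):  # пробегаемся по значениям
--         if val == "n":  # встретили н
--             x_save = ''.join(Tdnf[i + 1]) + Tdnf[i + 2]  # записали икс с цифрой
--             del Tdnf[i:i + 2]  # удалили н и икс с цифрой
--             Tdnf[i] = '(' + x_save + " / " + x_save + ')'  # Собрали строчку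
--     Tdnf = ''.join(Tdnf)  # преобразовали в строку
--     return Tdnf  # вернули
-- ===== SOURCE B (Python) =====
-- def Sheffer(Tdnf):
--     s = ['/' if c == '^' or c == 'v' else c for c in Tdnf]
--     out = []
--     i = 0
--     n = len(s)
--     while i < n:
--         if s[i] == 'n':
--             t = s[i + 1] + s[i + 2]
--             out.append('(' + t + ' / ' + t + ')')
--             i += 3
--         else:
--             out.append(s[i])
--             i += 1
--     return ''.join(out)
-- ===== Notes on version B (the rewrite author's own statement) =====
-- stated objective: alternative
-- what changed: replaced the enumerate-over-a-mutated-list pass (in-place slice deletion and element overwrite) by a single forward cursor scan that appends pieces to a fresh output buffer and joins once; the input list is never mutated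
import Mathlib
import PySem

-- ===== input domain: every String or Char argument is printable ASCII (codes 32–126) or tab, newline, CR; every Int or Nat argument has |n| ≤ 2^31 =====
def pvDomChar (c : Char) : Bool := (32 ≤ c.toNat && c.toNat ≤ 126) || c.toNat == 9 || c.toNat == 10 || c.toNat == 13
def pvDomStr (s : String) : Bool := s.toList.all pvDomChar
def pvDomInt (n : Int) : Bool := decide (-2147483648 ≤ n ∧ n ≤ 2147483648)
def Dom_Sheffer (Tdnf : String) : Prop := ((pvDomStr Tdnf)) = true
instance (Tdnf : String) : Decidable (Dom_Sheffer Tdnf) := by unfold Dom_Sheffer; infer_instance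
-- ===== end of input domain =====

-- B replaces A's enumerate-over-a-list-mutated-in-place pass (slice deletion + overwrite) by one
-- forward cursor scan appending pieces to a fresh buffer; return values agree wherever A returns.

-- ===== PORT A =====
-- A's for-loop is Python's enumerate over the list it mutates: an index cursor into the current
-- list; 'del Tdnf[i:i+2]' removes two elements, then Tdnf[i] is overwritten. none = IndexError.
-- fuel = number of remaining loop iterations bound (the list length never grows, the cursor
-- always advances, so L.length fuel suffices); structural recursion on it.
def shefLoopA : Nat → List String → Nat → Option (List String)
  | 0, L, _ => some L
  | fuel+1, L, i =>
    if h : i < L.length then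
      if L[i] = "n" then
        match L[i+1]?, L[i+2]? with
        | some a, some b =>
          let x := a ++ b
          let L' := L.take i ++ L.drop (i + 2)
          let L'' := L'.set i ("(" ++ x ++ " / " ++ x ++ ")")
          shefLoopA fuel L'' (i + 1)
        | _, _ => none
      else shefLoopA fuel L (i + 1)
    else some L

def Sheffer (Tdnf : String) : String :=
  let L := Tdnf.toList.map (fun x => if x = '^' ∨ x = 'v' then "/" else String.singleton x)
  match shefLoopA L.length L 0 with
  | some L' => String.join L'
  | none => ""   -- unreachable under Pre_Sheffer (the Python raises IndexError there)

-- ===== PORT B =====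
def mapChB (c : Char) : Char := if c = '^' ∨ c = 'v' then '/' else c

-- Source B's while-loop cursor: at an 'n' consume three chars and append one bracketed piece,
-- otherwise append the char; join the buffer at the end. The [] at a short 'n' is the
-- IndexError case, excluded by Pre_Sheffer.
def piecesB : List Char → List String
  | [] => []
  | 'n' :: a :: b :: r =>
      ("(" ++ (String.singleton a ++ String.singleton b) ++ " / "
           ++ (String.singleton a ++ String.singleton b) ++ ")") :: piecesB r
  | c :: rest => if c = 'n' then [] else String.singleton c :: piecesB rest

def Sheffer_alt (Tdnf : String) : String :=
  String.join (piecesB (Tdnf.toList.map mapChB))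

-- ===== PRECONDITION & SPEC =====
-- Pre_ excludes exactly the inputs on which the Python A raises IndexError. Closed form: the
-- string is a sequence of blocks, each either one non-'n' character or an 'n' followed by any two
-- characters — the grammar ([^n] | n..)*. okChars checks this shape of the input string itself;
-- it runs neither port and computes no output.
def okChars : List Char → Bool
  | [] => true
  | 'n' :: _ :: _ :: r => okChars r
  | c :: rest => if c = 'n' then false else okChars rest

def Pre_Sheffer (Tdnf : String) : Prop := okChars Tdnf.toList = true
instance (Tdnf : String) : Decidable (Pre_Sheffer Tdnf) := by unfold Pre_Sheffer; infer_instance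
def pvWitness_Sheffer : String := "nx1"

def Spec_Sheffer (Tdnf : String) (out : String) : Prop := out = Sheffer_alt Tdnf
instance (Tdnf : String) (out : String) : Decidable (Spec_Sheffer Tdnf out) := by unfold Spec_Sheffer; infer_instance

-- ===== CLAIM (what is proved, stated in full; the proofs are below) =====
def Claim_equal_Sheffer : Prop := ∀ (Tdnf : String), Dom_Sheffer Tdnf → Pre_Sheffer Tdnf → Spec_Sheffer Tdnf (Sheffer Tdnf)

-- ===== LEMMAS AND PROOFS =====

theorem okChars_cons_ne (c : Char) (l : List Char) (hc : c ≠ 'n') :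
    okChars (c :: l) = okChars l := by
  rw [okChars.eq_def]
  split <;> simp_all

theorem mapChB_ne_n (c : Char) (hc : c ≠ 'n') : mapChB c ≠ 'n' := by
  simp only [mapChB]; split <;> simp_all

-- mapChB fixes 'n'-positions, so okChars is insensitive to the sign-replacement pass
theorem okChars_map (l : List Char) : okChars (l.map mapChB) = okChars l := by
  induction l using okChars.induct with
  | case1 => rfl
  | case2 a b r ih => simp [okChars, mapChB, ih]
  | case3 rest h =>
      rcases rest with _ | ⟨x, _ | ⟨y, t⟩⟩
      · simp [okChars, mapChB]
      · simp [okChars, mapChB]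
      · exact (h x y t rfl rfl).elim
  | case4 c rest hpat hc ih =>
      rw [List.map_cons, okChars_cons_ne _ _ (mapChB_ne_n c hc), okChars_cons_ne _ _ hc, ih]

theorem singleton_ne_n (c : Char) (hc : c ≠ 'n') : String.singleton c ≠ "n" := by
  intro h
  exact hc (by simpa using congrArg String.toList h)

-- loop invariant: done = the finished pieces left of the cursor; right of it, singletons of m
theorem shefLoopA_inv (m : List Char) (done : List String) (fuel : Nat)
    (hfuel : m.length ≤ fuel) (hok : okChars m = true) :
    shefLoopA fuel (done ++ m.map String.singleton) done.length = some (done ++ piecesB m) := by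
  induction m using piecesB.induct generalizing done fuel with
  | case1 =>
      cases fuel with
      | zero => simp [shefLoopA, piecesB]
      | succ f => simp [shefLoopA, piecesB]
  | case2 a b r ih =>
      have hpos : 1 ≤ fuel := by simp at hfuel; omega
      obtain ⟨f, rfl⟩ : ∃ f, fuel = f + 1 := ⟨fuel - 1, by omega⟩
      have hf : r.length ≤ f := by simp at hfuel; omega
      have hok' : okChars r = true := by simpa [okChars] using hok
      rw [shefLoopA]
      have hlen : done.length < (done ++ ('n'::a::b::r).map String.singleton).length := by
        simp
      rw [dif_pos hlen]
      have hget : (done ++ ('n'::a::b::r).map String.singleton)[done.length]'hlen = String.singleton 'n' := by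
        simp
      have hget1 : (done ++ ('n'::a::b::r).map String.singleton)[done.length+1]? = some (String.singleton a) := by
        simp
      have hget2 : (done ++ ('n'::a::b::r).map String.singleton)[done.length+2]? = some (String.singleton b) := by
        simp
      rw [hget]
      rw [if_pos (by decide : String.singleton 'n' = "n")]
      have htake : (done ++ ('n'::a::b::r).map String.singleton).take done.length = done := by
        simp
      have hdrop : (done ++ ('n'::a::b::r).map String.singleton).drop (done.length + 2) = String.singleton b :: r.map String.singleton := by
        simp [List.drop_append]
      split
      next sa sb h1 h2 =>
        rw [hget1] at h1; rw [hget2] at h2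
        cases h1; cases h2
        dsimp only
        rw [htake, hdrop]
        have hset : (done ++ String.singleton b :: r.map String.singleton).set done.length
            ("(" ++ (String.singleton a ++ String.singleton b) ++ " / " ++ (String.singleton a ++ String.singleton b) ++ ")")
            = (done ++ [("(" ++ (String.singleton a ++ String.singleton b) ++ " / " ++ (String.singleton a ++ String.singleton b) ++ ")")]) ++ r.map String.singleton := by
          simp
        rw [hset]
        have hlen1 : done.length + 1 = (done ++ [("(" ++ (String.singleton a ++ String.singleton b) ++ " / " ++ (String.singleton a ++ String.singleton b) ++ ")")]).length := by
          simp
        rw [hlen1, ih _ _ hf hok']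
        simp [piecesB]
      next hnone =>
        exact ((hnone _ _ hget1 hget2).elim)
  | case3 rest hpat =>
      exfalso
      rcases rest with _ | ⟨x, _ | ⟨y, t⟩⟩
      · simp [okChars] at hok
      · simp [okChars] at hok
      · exact hpat x y t rfl rfl
  | case4 c rest hpat hc ih =>
      have hpos : 1 ≤ fuel := by simp at hfuel; omega
      obtain ⟨f, rfl⟩ : ∃ f, fuel = f + 1 := ⟨fuel - 1, by omega⟩
      have hf : rest.length ≤ f := by simp at hfuel; omega
      have hok' : okChars rest = true := by
        rwa [okChars_cons_ne _ _ hc] at hok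
      rw [shefLoopA]
      have hlen : done.length < (done ++ (c::rest).map String.singleton).length := by simp
      rw [dif_pos hlen]
      have hget : (done ++ (c::rest).map String.singleton)[done.length]'hlen = String.singleton c := by
        simp
      rw [hget, if_neg (singleton_ne_n c hc)]
      have hsplit : done ++ (c::rest).map String.singleton = (done ++ [String.singleton c]) ++ rest.map String.singleton := by
        simp
      rw [hsplit]
      have hlen1 : done.length + 1 = (done ++ [String.singleton c]).length := by simp
      rw [hlen1, ih _ _ hf hok']
      simp [piecesB, hc]

-- A's sign-replacement list equals the singletons of B's mapped characters
theorem mapA_eq (l : List Char) :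
    l.map (fun x => if x = '^' ∨ x = 'v' then "/" else String.singleton x)
      = (l.map mapChB).map String.singleton := by
  simp only [List.map_map]
  refine List.map_congr_left (fun c _ => ?_)
  simp only [Function.comp, mapChB, apply_ite String.singleton]
  rfl

-- ===== VERDICT (by name: the statement is the Claim_ definition above) =====
theorem Sheffer_spec : Claim_equal_Sheffer := by
  intro T _ hpre
  unfold Spec_Sheffer Sheffer Sheffer_alt
  have hok : okChars (T.toList.map mapChB) = true := by
    rw [okChars_map]; exact hpre
  have hinv := shefLoopA_inv (T.toList.map mapChB) [] (T.toList.map mapChB).length le_rfl hok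
  simp only [List.nil_append, List.length_nil] at hinv
  simp only [mapA_eq, List.length_map] at hinv ⊢
  rw [hinv]
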